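-- pv_equiv track=rewrite | github.com/RegHunterZ/RegHunterZ-Solver | inline_range_hh/range_util.py | flatten_selected_cells
-- ===== SOURCE A (Python) =====
-- from typing import Dict, List, Tuple, Iterable
--
-- RANKS = ["A","K","Q","J","T","9","8","7","6","5","4","3","2"]
--
-- def hand_name(r: int, c: int) -> str:
--     # 13x13 matrix, excluding labels row/col; r,c in [0..12] where 0 -> A, 12 -> 2
--     # pairs on diagonal, suited below, offsuit above (AKs is row K col A in standard top-left AA layout),
--     # but our input is always the conventional 13x13 with AA at (0,0)
--     ra = RANKS[r]
--     rb = RANKS[c]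
--     if r == c:
--         return f"{ra}{rb}"
--     elif r < c:
--         # top-right triangle = offsuit (e.g., AKo at row A col K)
--         return f"{ra}{rb}o"
--     else:
--         # bottom-left triangle = suited (e.g., AKs at row K col A)
--         return f"{ra}{rb}s"
--
-- def flatten_selected_cells(selected: Iterable[Tuple[int,int]]) -> List[str]:
--     # selected -> list of (row, col) 0-based in the 13x13 actual grid (AA..22)
--     hands = [hand_name(r, c) for (r, c) in selected]
--     # keep a stable order that's readable: Pairs top-down, suited/offsuit by top-left to bottom-right scan
--     # Sort key: pairs first by rank index, then suited, then offsuit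
--     rank_index = {r:i for i,r in enumerate(RANKS)}
--     def sort_key(h: str):
--         if len(h) == 2: # pair
--             return (0, rank_index[h[0]])
--         # len=3 with s/o
--         a, b, t = h[0], h[1], h[2]
--         if t == "s":
--             return (1, rank_index[a], rank_index[b])
--         return (2, rank_index[a], rank_index[b])
--     hands.sort(key=sort_key)
--     return hands
-- ===== SOURCE B (Python) =====
-- RANKS = ["A","K","Q","J","T","9","8","7","6","5","4","3","2"]
--
-- def flatten_selected_cells(selected):
--     # partition cells into pairs / suited / offsuit in one pass, then sort each
--     # bucket by the rank indexes of its two rank letters and concatenate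
--     rank_index = {ch: i for i, ch in enumerate(RANKS)}
--     pairs, suited, offsuit = [], [], []
--     for r, c in selected:
--         name = RANKS[r] + RANKS[c]
--         if r == c:
--             pairs.append(name)
--         elif r > c:
--             suited.append(name + "s")
--         else:
--             offsuit.append(name + "o")
--     def key(h):
--         return (rank_index[h[0]], rank_index[h[1]])
--     return sorted(pairs, key=key) + sorted(suited, key=key) + sorted(offsuit, key=key)
-- ===== Notes on version B (the rewrite author's own statement) =====
-- stated objective: alternative
-- what changed: Replaces the single composite-key stable sort (which re-parses each hand string into a (group, rank, rank) tuple) with a one-pass partition of the cells into pairs/suited/offsuit buckets followed by three independent sorts on plain (rank, rank) keys, concatenated in group order.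
-- outside the precondition, e.g. on flatten_selected_cells([(13, 0)]): A raises IndexError, B raises IndexError
import Mathlib
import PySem

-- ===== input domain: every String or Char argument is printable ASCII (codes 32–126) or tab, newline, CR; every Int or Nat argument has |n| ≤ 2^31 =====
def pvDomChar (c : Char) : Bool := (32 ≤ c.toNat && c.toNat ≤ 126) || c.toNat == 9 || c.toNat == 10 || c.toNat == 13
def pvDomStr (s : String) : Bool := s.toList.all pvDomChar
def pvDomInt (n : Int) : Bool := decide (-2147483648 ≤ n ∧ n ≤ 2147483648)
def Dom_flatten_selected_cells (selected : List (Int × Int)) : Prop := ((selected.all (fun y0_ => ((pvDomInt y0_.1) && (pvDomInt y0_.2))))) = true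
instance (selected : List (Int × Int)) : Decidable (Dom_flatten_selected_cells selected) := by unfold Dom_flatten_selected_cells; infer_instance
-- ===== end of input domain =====

-- B replaces A's single composite-key stable sort (which re-parses each hand string) by a
-- one-pass partition into pairs/suited/offsuit buckets, each sorted on a plain (rank, rank)
-- key and concatenated in group order (objective: alternative decomposition, same cost).

-- ===== PORT A =====
def pvRANKS : List String := ["A","K","Q","J","T","9","8","7","6","5","4","3","2"]

-- Python str '+' on these ASCII strings; exact (concatenation of the code-point lists)
def strcat (a b : String) : String := String.ofList (a.toList ++ b.toList)

-- Python h[i] is a 1-character str; wrap the selected Char back into a String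
def chStr (c? : Option Char) : String :=
  match c? with
  | some c => String.ofList [c]
  | none => ""

def hand_name (r c : Int) : String :=
  let ra := (PySem.List.pyGet? pvRANKS r).getD ""   -- RANKS[r]; IndexError excluded by Pre_
  let rb := (PySem.List.pyGet? pvRANKS c).getD ""
  if r = c then strcat ra rb
  else if r < c then strcat (strcat ra rb) "o"
  else strcat (strcat ra rb) "s"

-- rank_index = {r: i for i, r in enumerate(RANKS)}
def pvRankIndexA : PySem.Dict String Int :=
  (PySem.List.enumerate pvRANKS 0).foldl (fun d p => d.insert p.2 p.1) PySem.Dict.empty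

-- A's variable-length tuple key (0,i) / (1,i,j) / (2,i,j) encoded as ONE Int preserving
-- Python's lexicographic tuple order on all reachable keys (components lie in [0,12]):
-- (g, i[, j]) ↦ 169*g + 13*i + j (j = 0 for pairs).  Dict lookups use default 0: a KeyError
-- is unreachable, every hand character is a RANKS entry.
def sort_keyA (h : String) : Int :=
  if PySem.Str.len h == 2 then
    13 * PySem.Dict.getD pvRankIndexA (chStr (PySem.Str.pyGet? h 0)) 0
  else
    let a := PySem.Dict.getD pvRankIndexA (chStr (PySem.Str.pyGet? h 0)) 0
    let b := PySem.Dict.getD pvRankIndexA (chStr (PySem.Str.pyGet? h 1)) 0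
    if chStr (PySem.Str.pyGet? h 2) == "s" then 169 + 13 * a + b
    else 338 + 13 * a + b

def flatten_selected_cells (selected : List (Int × Int)) : List String :=
  let hands := selected.map (fun rc => hand_name rc.1 rc.2)
  PySem.List.sorted hands sort_keyA false

-- ===== PORT B =====
-- rank_index = {ch: i for i, ch in enumerate(RANKS)} (Source B builds its own copy)
def pvRankIndexB : PySem.Dict String Int :=
  (PySem.List.enumerate pvRANKS 0).foldl (fun d p => d.insert p.2 p.1) PySem.Dict.empty

def keyB1 (h : String) : Int := PySem.Dict.getD pvRankIndexB (chStr (PySem.Str.pyGet? h 0)) 0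
def keyB2 (h : String) : Int := PySem.Dict.getD pvRankIndexB (chStr (PySem.Str.pyGet? h 1)) 0

-- the body of B's single partitioning loop
def pvPartStep (acc : List String × List String × List String) (rc : Int × Int) :
    List String × List String × List String :=
  let ra := (PySem.List.pyGet? pvRANKS rc.1).getD ""
  let rb := (PySem.List.pyGet? pvRANKS rc.2).getD ""
  let name := strcat ra rb
  if rc.1 = rc.2 then (acc.1 ++ [name], acc.2.1, acc.2.2)
  else if rc.2 < rc.1 then (acc.1, acc.2.1 ++ [strcat name "s"], acc.2.2)
  else (acc.1, acc.2.1, acc.2.2 ++ [strcat name "o"])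

def flatten_selected_cells_alt (selected : List (Int × Int)) : List String :=
  let t := selected.foldl pvPartStep ([], [], [])
  PySem.List.sorted2 t.1 keyB1 keyB2 false ++ PySem.List.sorted2 t.2.1 keyB1 keyB2 false
    ++ PySem.List.sorted2 t.2.2 keyB1 keyB2 false

-- ===== PRECONDITION & SPEC =====
-- Pre_ excludes exactly the cells outside [-13, 12], where RANKS[r]/RANKS[c] raises IndexError
-- (both in A and in B); A returns a value on every admitted input.
def Pre_flatten_selected_cells (selected : List (Int × Int)) : Prop :=
  ∀ p ∈ selected, -13 ≤ p.1 ∧ p.1 < 13 ∧ -13 ≤ p.2 ∧ p.2 < 13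
instance (selected : List (Int × Int)) : Decidable (Pre_flatten_selected_cells selected) := by
  unfold Pre_flatten_selected_cells; infer_instance

def pvWitness_flatten_selected_cells : (List (Int × Int)) := [(0, 0), (0, 1), (2, 0)]

def Spec_flatten_selected_cells (selected : List (Int × Int)) (out : List String) : Prop := out = flatten_selected_cells_alt selected
instance (selected : List (Int × Int)) (out : List String) : Decidable (Spec_flatten_selected_cells selected out) := by unfold Spec_flatten_selected_cells; infer_instance

-- ===== CLAIM (what is proved, stated in full; the proofs are below) =====
def Claim_equal_flatten_selected_cells : Prop := ∀ (selected : List (Int × Int)), Dom_flatten_selected_cells selected → Pre_flatten_selected_cells selected → Spec_flatten_selected_cells selected (flatten_selected_cells selected)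

-- ===== LEMMAS AND PROOFS =====

def goodC (x : Int × Int) : Prop := -13 ≤ x.1 ∧ x.1 < 13 ∧ -13 ≤ x.2 ∧ x.2 < 13

def classC (x : Int × Int) : Int := if x.1 = x.2 then 0 else if x.2 < x.1 then 1 else 2

def nameA (x : Int × Int) : String := hand_name x.1 x.2

def cmpA : String → String → Bool := fun a b => decide (sort_keyA a < sort_keyA b)

def cmpB : String → String → Bool := fun a b =>
  decide (keyB1 a < keyB1 b) || (!decide (keyB1 b < keyB1 a) && decide (keyB2 a < keyB2 b))

-- the three key functions on a good cell's hand name, as one finite check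
set_option maxHeartbeats 2000000 in
lemma finA : ∀ r ∈ PySem.List.pyRange (-13) 13 1, ∀ c ∈ PySem.List.pyRange (-13) 13 1,
    sort_keyA (nameA (r, c)) = 169 * classC (r, c) + 13 * (r.emod 13)
      + (if r = c then 0 else c.emod 13) := by decide

set_option maxHeartbeats 4000000 in
lemma finB : ∀ r ∈ PySem.List.pyRange (-13) 13 1, ∀ c ∈ PySem.List.pyRange (-13) 13 1,
    keyB1 (nameA (r, c)) = r.emod 13 ∧ keyB2 (nameA (r, c)) = c.emod 13 := by decide

lemma keyFacts (x : Int × Int) (hx : goodC x) :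
    sort_keyA (nameA x) = 169 * classC x + 13 * (x.1.emod 13)
      + (if x.1 = x.2 then 0 else x.2.emod 13)
    ∧ keyB1 (nameA x) = x.1.emod 13 ∧ keyB2 (nameA x) = x.2.emod 13 := by
  obtain ⟨r, c⟩ := x
  obtain ⟨h1, h2, h3, h4⟩ := hx
  have hr : r ∈ PySem.List.pyRange (-13) 13 1 := (PySem.List.mem_pyRange_one).2 ⟨h1, h2⟩
  have hc : c ∈ PySem.List.pyRange (-13) 13 1 := (PySem.List.mem_pyRange_one).2 ⟨h3, h4⟩
  exact ⟨finA r hr c hc, finB r hr c hc⟩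

lemma emod13_bounds (r : Int) : 0 ≤ r.emod 13 ∧ r.emod 13 < 13 :=
  ⟨Int.emod_nonneg _ (by norm_num), Int.emod_lt_of_pos _ (by norm_num)⟩

lemma classC_zero_iff (x : Int × Int) : classC x = 0 ↔ x.1 = x.2 := by
  unfold classC; split_ifs <;> simp_all

lemma cmpA_true_of_class_lt (x y : Int × Int) (hx : goodC x) (hy : goodC y)
    (h : classC x < classC y) : cmpA (nameA x) (nameA y) = true := by
  obtain ⟨kx, -, -⟩ := keyFacts x hx
  obtain ⟨ky, -, -⟩ := keyFacts y hy
  have b1 := emod13_bounds x.1; have b2 := emod13_bounds x.2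
  have b3 := emod13_bounds y.1; have b4 := emod13_bounds y.2
  simp only [cmpA, decide_eq_true_eq]
  rw [kx, ky]
  unfold classC at h ⊢
  split_ifs at h ⊢ <;> omega

lemma cmpA_false_of_class_gt (x y : Int × Int) (hx : goodC x) (hy : goodC y)
    (h : classC y < classC x) : cmpA (nameA x) (nameA y) = false := by
  obtain ⟨kx, -, -⟩ := keyFacts x hx
  obtain ⟨ky, -, -⟩ := keyFacts y hy
  have b1 := emod13_bounds x.1; have b2 := emod13_bounds x.2
  have b3 := emod13_bounds y.1; have b4 := emod13_bounds y.2
  simp only [cmpA, decide_eq_false_iff_not, not_lt]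
  rw [kx, ky]
  unfold classC at h ⊢
  split_ifs at h ⊢ <;> omega

lemma cmpA_eq_cmpB_of_class_eq (x y : Int × Int) (hx : goodC x) (hy : goodC y)
    (h : classC x = classC y) : cmpA (nameA x) (nameA y) = cmpB (nameA x) (nameA y) := by
  obtain ⟨kxA, kx1, kx2⟩ := keyFacts x hx
  obtain ⟨kyA, ky1, ky2⟩ := keyFacts y hy
  have b1 := emod13_bounds x.1; have b2 := emod13_bounds x.2
  have b3 := emod13_bounds y.1; have b4 := emod13_bounds y.2
  have hxe : x.1 = x.2 → x.1.emod 13 = x.2.emod 13 := fun e => by rw [e]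
  have hye : y.1 = y.2 → y.1.emod 13 = y.2.emod 13 := fun e => by rw [e]
  simp only [cmpA, cmpB]
  rw [kxA, kyA, kx1, kx2, ky1, ky2]
  unfold classC at h ⊢
  rcases eq_or_ne x.1 x.2 with e1 | e1 <;> rcases eq_or_ne y.1 y.2 with e2 | e2
  · rw [e1] at h ⊢; rw [e2] at h ⊢
    simp only [if_pos rfl] at h ⊢
    by_cases p1 : x.2.emod 13 < y.2.emod 13 <;> by_cases p2 : y.2.emod 13 < x.2.emod 13 <;>
      simp [p1, p2] <;> omega
  · exfalso; rw [e1, if_pos rfl, if_neg e2] at h; split_ifs at h <;> omega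
  · exfalso; rw [e2, if_pos rfl, if_neg e1] at h; split_ifs at h <;> omega
  · rw [if_neg e1, if_neg e2] at h ⊢
    split_ifs at h ⊢ <;>
      (by_cases p1 : x.1.emod 13 < y.1.emod 13 <;> by_cases p2 : y.1.emod 13 < x.1.emod 13 <;>
       by_cases p3 : x.2.emod 13 < y.2.emod 13 <;> simp [p1, p2, p3] <;> omega)

lemma insertBy_append_not (before : String → String → Bool) (x : String)
    (P R : List String) (h : ∀ y ∈ P, before x y = false) :
    PySem.List.insertBy before x (P ++ R) = P ++ PySem.List.insertBy before x R := by
  induction P with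
  | nil => simp
  | cons p P ih =>
    simp only [List.cons_append, PySem.List.insertBy, h p (List.mem_cons_self), Bool.false_eq_true,
      if_false]
    exact congrArg (p :: ·) (ih (fun y hy => h y (List.mem_cons_of_mem _ hy)))

lemma insertBy_append_yes (before : String → String → Bool) (x : String)
    (P R : List String) (h : ∀ y ∈ R, before x y = true) :
    PySem.List.insertBy before x (P ++ R) = PySem.List.insertBy before x P ++ R := by
  induction P with
  | nil =>
    cases R with
    | nil => simp [PySem.List.insertBy]
    | cons r R => simp [PySem.List.insertBy, h r (List.mem_cons_self)]
  | cons p P ih =>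
    simp only [List.cons_append, PySem.List.insertBy]
    by_cases hp : before x p = true
    · simp [hp]
    · simp only [hp, if_false, Bool.false_eq_true]
      simpa using congrArg (p :: ·) ih

lemma insertBy_congr (b1 b2 : String → String → Bool) (x : String) (ys : List String)
    (h : ∀ y ∈ ys, b1 x y = b2 x y) :
    PySem.List.insertBy b1 x ys = PySem.List.insertBy b2 x ys := by
  induction ys with
  | nil => rfl
  | cons y ys ih =>
    simp only [PySem.List.insertBy, h y (List.mem_cons_self)]
    by_cases hy : b2 x y = true
    · simp [hy]
    · simp only [hy, if_false, Bool.false_eq_true]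
      exact congrArg (y :: ·) (ih (fun z hz => h z (List.mem_cons_of_mem _ hz)))

def isP (x : Int × Int) : Bool := decide (x.1 = x.2)
def isS (x : Int × Int) : Bool := !decide (x.1 = x.2) && decide (x.2 < x.1)
def isO (x : Int × Int) : Bool := !decide (x.1 = x.2) && !decide (x.2 < x.1)

lemma part_spec (L : List (Int × Int)) (p s o : List String) :
    L.foldl pvPartStep (p, s, o)
      = (p ++ (L.filter isP).map nameA, s ++ (L.filter isS).map nameA,
         o ++ (L.filter isO).map nameA) := by
  induction L generalizing p s o with
  | nil => simp
  | cons x L ih =>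
    obtain ⟨a, b⟩ := x
    by_cases h1 : a = b
    · simp only [List.foldl_cons, pvPartStep, h1, if_pos rfl, List.filter_cons, isP, isS, isO,
        decide_eq_true_eq]
      rw [ih]
      simp [nameA, hand_name, h1, isP, isS, isO]
    · by_cases h2 : b < a
      · have h3 : ¬ a < b := by omega
        simp only [List.foldl_cons, pvPartStep, h1, h2, if_neg, if_pos, List.filter_cons, isP,
          isS, isO]
        rw [ih]
        simp [nameA, hand_name, h1, h2, h3, isP, isS, isO, strcat]
      · have h3 : a < b := by omega
        simp only [List.foldl_cons, pvPartStep, h1, h2, if_neg, List.filter_cons, isP, isS, isO]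
        rw [ih]
        simp [nameA, hand_name, h1, h2, h3, isP, isS, isO, strcat]

lemma main_lemma (L : List (Int × Int)) (p s o : List String)
    (hL : ∀ x ∈ L, goodC x)
    (hp : ∀ h ∈ p, ∃ x, goodC x ∧ classC x = 0 ∧ h = nameA x)
    (hs : ∀ h ∈ s, ∃ x, goodC x ∧ classC x = 1 ∧ h = nameA x)
    (ho : ∀ h ∈ o, ∃ x, goodC x ∧ classC x = 2 ∧ h = nameA x) :
    (L.map nameA).foldl (fun acc h => PySem.List.insertBy cmpA h acc) (p ++ (s ++ o))
      = ((L.filter isP).map nameA).foldl (fun acc h => PySem.List.insertBy cmpB h acc) p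
        ++ (((L.filter isS).map nameA).foldl (fun acc h => PySem.List.insertBy cmpB h acc) s
        ++ ((L.filter isO).map nameA).foldl (fun acc h => PySem.List.insertBy cmpB h acc) o) := by
  induction L generalizing p s o with
  | nil => simp
  | cons x L ih =>
    have hx : goodC x := hL x List.mem_cons_self
    have hL' : ∀ z ∈ L, goodC z := fun z hz => hL z (List.mem_cons_of_mem _ hz)
    simp only [List.map_cons, List.foldl_cons, List.filter_cons]
    by_cases h1 : x.1 = x.2
    · have hcx : classC x = 0 := (classC_zero_iff x).2 h1
      have e1 : isP x = true := by simp [isP, h1]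
      have e2 : isS x = false := by simp [isS, h1]
      have e3 : isO x = false := by simp [isO, h1]
      rw [e1, e2, e3]
      simp only [List.map_cons, List.foldl_cons]
      rw [insertBy_append_yes cmpA (nameA x) p (s ++ o) ?hso]
      case hso =>
        intro y hy
        rcases List.mem_append.1 hy with hy | hy
        · obtain ⟨z, hz, hcz, rfl⟩ := hs y hy
          exact cmpA_true_of_class_lt x z hx hz (by omega)
        · obtain ⟨z, hz, hcz, rfl⟩ := ho y hy
          exact cmpA_true_of_class_lt x z hx hz (by omega)
      rw [insertBy_congr cmpA cmpB (nameA x) p ?hpc]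
      case hpc =>
        intro y hy
        obtain ⟨z, hz, hcz, rfl⟩ := hp y hy
        exact cmpA_eq_cmpB_of_class_eq x z hx hz (by omega)
      exact ih (PySem.List.insertBy cmpB (nameA x) p) s o hL'
        (fun y hy => by
          rcases (PySem.List.mem_insertBy cmpB (nameA x) y p).1 hy with rfl | hy
          · exact ⟨x, hx, hcx, rfl⟩
          · exact hp y hy)
        hs ho
    · by_cases h2 : x.2 < x.1
      · have hcx : classC x = 1 := by unfold classC; rw [if_neg h1, if_pos h2]
        have e1 : isP x = false := by simp [isP, h1]
        have e2 : isS x = true := by simp [isS, h1, h2]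
        have e3 : isO x = false := by simp [isO, h2]
        rw [e1, e2, e3]
        simp only [List.map_cons, List.foldl_cons]
        rw [insertBy_append_not cmpA (nameA x) p (s ++ o) ?hpn]
        case hpn =>
          intro y hy
          obtain ⟨z, hz, hcz, rfl⟩ := hp y hy
          exact cmpA_false_of_class_gt x z hx hz (by omega)
        rw [insertBy_append_yes cmpA (nameA x) s o ?hon]
        case hon =>
          intro y hy
          obtain ⟨z, hz, hcz, rfl⟩ := ho y hy
          exact cmpA_true_of_class_lt x z hx hz (by omega)
        rw [insertBy_congr cmpA cmpB (nameA x) s ?hsc]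
        case hsc =>
          intro y hy
          obtain ⟨z, hz, hcz, rfl⟩ := hs y hy
          exact cmpA_eq_cmpB_of_class_eq x z hx hz (by omega)
        exact ih p (PySem.List.insertBy cmpB (nameA x) s) o hL' hp
          (fun y hy => by
            rcases (PySem.List.mem_insertBy cmpB (nameA x) y s).1 hy with rfl | hy
            · exact ⟨x, hx, hcx, rfl⟩
            · exact hs y hy)
          ho
      · have hcx : classC x = 2 := by unfold classC; rw [if_neg h1, if_neg h2]
        have e1 : isP x = false := by simp [isP, h1]
        have e2 : isS x = false := by simp [isS, h2]
        have e3 : isO x = true := by simp [isO, h1, h2]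
        rw [e1, e2, e3]
        simp only [List.map_cons, List.foldl_cons]
        rw [insertBy_append_not cmpA (nameA x) p (s ++ o) ?hpn2]
        case hpn2 =>
          intro y hy
          obtain ⟨z, hz, hcz, rfl⟩ := hp y hy
          exact cmpA_false_of_class_gt x z hx hz (by omega)
        rw [insertBy_append_not cmpA (nameA x) s o ?hsn]
        case hsn =>
          intro y hy
          obtain ⟨z, hz, hcz, rfl⟩ := hs y hy
          exact cmpA_false_of_class_gt x z hx hz (by omega)
        rw [insertBy_congr cmpA cmpB (nameA x) o ?hoc]
        case hoc =>
          intro y hy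
          obtain ⟨z, hz, hcz, rfl⟩ := ho y hy
          exact cmpA_eq_cmpB_of_class_eq x z hx hz (by omega)
        exact ih p s (PySem.List.insertBy cmpB (nameA x) o) hL' hp hs
          (fun y hy => by
            rcases (PySem.List.mem_insertBy cmpB (nameA x) y o).1 hy with rfl | hy
            · exact ⟨x, hx, hcx, rfl⟩
            · exact ho y hy)

-- ===== VERDICT (by name: the statement is the Claim_ definition above) =====
lemma sorted2_foldl (xs : List String) :
    PySem.List.sorted2 xs keyB1 keyB2 false
      = xs.foldl (fun acc x => PySem.List.insertBy cmpB x acc) [] := rfl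

theorem flatten_selected_cells_spec : Claim_equal_flatten_selected_cells := by
  intro selected _ hpre
  unfold Spec_flatten_selected_cells flatten_selected_cells flatten_selected_cells_alt
  have hsel : ∀ x ∈ selected, goodC x := fun x hx => hpre x hx
  rw [PySem.List.sorted_eq_foldl_insertBy]
  rw [part_spec selected [] [] []]
  simp only [List.nil_append]
  rw [sorted2_foldl, sorted2_foldl, sorted2_foldl]
  have := main_lemma selected [] [] [] hsel (by simp) (by simp) (by simp)
  simpa using this
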